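-- pv_equiv track=rewrite | github.com/pypi-data/pypi-mirror-391 | packages/rpk/rpk-5.5.1.tar.gz/rpk-5.5.1/rpk/rpk.py | is_template_enabled
-- ===== SOURCE A (Python) =====
-- def is_template_enabled(template, features):
--     if "only_if" not in template:
--         return True
--
--     # check if the template is enabled for the current robot features
--     for feature in template["only_if"]:
--         if feature.startswith("!"):
--             if feature[1:] in features:
--                 return False
--         else:
--             if feature not in features:
--                 return False
--     return True
-- ===== SOURCE B (Python) =====
-- def is_template_enabled(template, features):
--     if "only_if" not in template:
--         return True
--     required = set()
--     forbidden = set()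
--     for feature in template["only_if"]:
--         if feature.startswith("!"):
--             forbidden.add(feature[1:])
--         else:
--             required.add(feature)
--     return required.issubset(features) and forbidden.isdisjoint(features)
-- ===== Notes on version B (the rewrite author's own statement) =====
-- stated objective: alternative
-- what changed: Replaces the short-circuiting per-element loop by a single partition pass that builds 'required' and 'forbidden' sets, then decides with set algebra (issubset/isdisjoint).
import Mathlib
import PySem

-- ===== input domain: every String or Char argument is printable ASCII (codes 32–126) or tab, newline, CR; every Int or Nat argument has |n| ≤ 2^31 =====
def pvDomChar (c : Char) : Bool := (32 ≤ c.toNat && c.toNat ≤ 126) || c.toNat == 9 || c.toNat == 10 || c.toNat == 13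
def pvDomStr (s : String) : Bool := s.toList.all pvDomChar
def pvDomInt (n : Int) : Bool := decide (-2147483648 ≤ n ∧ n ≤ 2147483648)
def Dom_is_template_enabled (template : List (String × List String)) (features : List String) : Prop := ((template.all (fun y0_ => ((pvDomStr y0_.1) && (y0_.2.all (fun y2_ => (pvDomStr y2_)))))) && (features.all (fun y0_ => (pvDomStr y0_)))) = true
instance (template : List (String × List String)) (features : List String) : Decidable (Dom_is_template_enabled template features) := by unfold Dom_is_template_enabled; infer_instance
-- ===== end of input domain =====

-- B replaces A's short-circuiting loop by one partition pass building two sets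
-- (required / forbidden) followed by set-algebra checks (issubset / isdisjoint).

-- ===== PORT A =====
-- A's for-loop with early 'return False', as structural recursion over only_if.
def pvLoopA (features : List String) : List String → Bool
  | [] => true
  | f :: rest =>
    if PySem.Str.startswith f "!" then
      if features.contains (PySem.Str.slice f (some 1) none) then false
      else pvLoopA features rest
    else
      if features.contains f then pvLoopA features rest
      else false

def is_template_enabled (template : List (String × List String)) (features : List String) : Bool :=
  match PySem.Dict.get? (PySem.Dict.mk template) "only_if" with
  | none => true
  | some only_if => pvLoopA features only_if

-- ===== PORT B =====
-- one fold partitioning only_if into (required, forbidden) sets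
def pvPartitionB (only_if : List String) : PySem.Set String × PySem.Set String :=
  only_if.foldl
    (fun rf f =>
      if PySem.Str.startswith f "!" then
        (rf.1, PySem.Set.add rf.2 (PySem.Str.slice f (some 1) none))
      else
        (PySem.Set.add rf.1 f, rf.2))
    (PySem.Set.empty, PySem.Set.empty)

def is_template_enabled_alt (template : List (String × List String)) (features : List String) : Bool :=
  match PySem.Dict.get? (PySem.Dict.mk template) "only_if" with
  | none => true
  | some only_if =>
    let rf := pvPartitionB only_if
    PySem.Set.issubset rf.1 features && PySem.Set.isdisjoint rf.2 features

-- ===== PRECONDITION & SPEC =====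
def Spec_is_template_enabled (template : List (String × List String)) (features : List String) (out : Bool) : Prop := out = is_template_enabled_alt template features
instance (template : List (String × List String)) (features : List String) (out : Bool) : Decidable (Spec_is_template_enabled template features out) := by unfold Spec_is_template_enabled; infer_instance

-- ===== CLAIM (what is proved, stated in full; the proofs are below) =====
def Claim_equal_is_template_enabled : Prop := ∀ (template : List (String × List String)) (features : List String), Dom_is_template_enabled template features → Spec_is_template_enabled template features (is_template_enabled template features)

-- ===== LEMMAS AND PROOFS =====

theorem issubset_add (feats r : PySem.Set String) (f : String) :
    PySem.Set.issubset (PySem.Set.add r f) feats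
      = (PySem.Set.issubset r feats && feats.contains f) := by
  simp only [PySem.Set.add, PySem.Set.issubset, PySem.Set.contains]
  split
  · rename_i h
    have hm : f ∈ r := by simpa using h
    by_cases hp : f ∈ feats
    · simp [hp]
    · simp [hp]
      exact ⟨f, hm, hp⟩
  · simp [List.all_append]

theorem isdisjoint_add (feats fb : PySem.Set String) (f : String) :
    PySem.Set.isdisjoint (PySem.Set.add fb f) feats
      = (PySem.Set.isdisjoint fb feats && !feats.contains f) := by
  simp only [PySem.Set.add, PySem.Set.isdisjoint, PySem.Set.contains]
  split
  · rename_i h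
    have hm : f ∈ fb := by simpa using h
    by_cases hp : f ∈ feats
    · simp [hp]
      exact ⟨f, hm, hp⟩
    · simp [hp]
  · simp [List.any_append, Bool.not_or]

theorem partition_spec (feats : List String) (lst : List String)
    (r fb : PySem.Set String) :
    (PySem.Set.issubset
        (lst.foldl (fun rf f =>
          if PySem.Str.startswith f "!" then
            (rf.1, PySem.Set.add rf.2 (PySem.Str.slice f (some 1) none))
          else
            (PySem.Set.add rf.1 f, rf.2)) (r, fb)).1 feats
      && PySem.Set.isdisjoint
        (lst.foldl (fun rf f =>
          if PySem.Str.startswith f "!" then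
            (rf.1, PySem.Set.add rf.2 (PySem.Str.slice f (some 1) none))
          else
            (PySem.Set.add rf.1 f, rf.2)) (r, fb)).2 feats)
      = (PySem.Set.issubset r feats && PySem.Set.isdisjoint fb feats
          && pvLoopA feats lst) := by
  induction lst generalizing r fb with
  | nil => simp [pvLoopA]
  | cons f rest ih =>
    simp only [List.foldl_cons, pvLoopA]
    by_cases hb : PySem.Str.startswith f "!"
    · rw [if_pos hb, if_pos hb, ih]
      rw [isdisjoint_add]
      by_cases hc : PySem.Str.slice f (some 1) none ∈ feats
      · simp [hc]
      · simp [hc]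
    · rw [if_neg hb, if_neg hb, ih]
      rw [issubset_add]
      by_cases hc : f ∈ feats
      · simp [hc]
      · simp [hc]

-- ===== VERDICT (by name: the statement is the Claim_ definition above) =====
theorem is_template_enabled_spec : Claim_equal_is_template_enabled := by
  intro template features _
  unfold Spec_is_template_enabled is_template_enabled is_template_enabled_alt
  cases h : PySem.Dict.get? (PySem.Dict.mk template) "only_if" with
  | none => rfl
  | some only_if =>
    simp only [pvPartitionB]
    rw [partition_spec features only_if PySem.Set.empty PySem.Set.empty]
    simp [PySem.Set.empty, PySem.Set.issubset, PySem.Set.isdisjoint]
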